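-- pv_equiv track=rewrite | github.com/emgould/redis-search | src/utils/json_lookup.py | get_lookup_stats
-- ===== SOURCE A (Python) =====
-- from typing import Any
--
-- def get_lookup_stats(lookup: dict[str, dict[str, Any]]) -> dict[str, int]:
--     """
--     Get statistics about the lookup dictionary.
--
--     Returns:
--         Dict with counts by media type
--     """
--     stats: dict[str, int] = {"movie": 0, "tv": 0, "total": 0}
--
--     for key in lookup:
--         stats["total"] += 1
--         if key.startswith("movie_"):
--             stats["movie"] += 1
--         elif key.startswith("tv_"):
--             stats["tv"] += 1
--
--     return stats
-- ===== SOURCE B (Python) =====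
-- def _label(k: str):
--     """Media-type label of a key: the part before the first '_', or None if no '_'."""
--     head, sep, _tail = k.partition("_")
--     return head if sep else None
--
-- def get_lookup_stats(lookup: dict[str, dict[str, "Any"]]) -> dict[str, int]:
--     """Two-stage: classify every key once by splitting at the first underscore,
--     then count the label occurrences (no per-prefix startswith tests)."""
--     labels = [_label(k) for k in lookup]
--     return {"movie": labels.count("movie"), "tv": labels.count("tv"), "total": len(labels)}
-- ===== Notes on version B (the rewrite author's own statement) =====
-- stated objective: alternative
-- what changed: Replaces A's single branchy accumulator loop with per-prefix startswith tests by a two-stage map-then-count: each key is classified once into a label (the text before its first underscore, via str.partition), and the three results are label counts plus the length of the label list.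
import Mathlib
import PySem

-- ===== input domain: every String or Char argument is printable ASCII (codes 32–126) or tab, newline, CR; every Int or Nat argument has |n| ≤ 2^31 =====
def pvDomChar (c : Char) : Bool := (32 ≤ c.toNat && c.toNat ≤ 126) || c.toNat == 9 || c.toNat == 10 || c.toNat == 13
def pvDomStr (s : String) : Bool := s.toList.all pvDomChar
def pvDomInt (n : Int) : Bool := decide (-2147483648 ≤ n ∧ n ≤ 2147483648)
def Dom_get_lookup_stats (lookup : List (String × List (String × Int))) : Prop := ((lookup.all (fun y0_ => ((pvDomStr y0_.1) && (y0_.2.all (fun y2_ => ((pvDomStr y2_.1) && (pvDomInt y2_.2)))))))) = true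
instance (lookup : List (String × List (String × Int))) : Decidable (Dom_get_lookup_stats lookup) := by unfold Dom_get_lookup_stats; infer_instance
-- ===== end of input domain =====

-- B replaces A's branchy accumulator loop (per-prefix startswith tests) with a two-stage
-- map-then-count: classify each key once by its text before the first underscore, then count labels.

-- ===== PORT A =====
-- stats = {"movie": 0, "tv": 0, "total": 0}; then one pass, 'stats[k] += 1' ported as Dict.modify k 0 (·+1) (the key is always present)
def get_lookup_stats (lookup : List (String × List (String × Int))) : List (String × Int) :=
  let stats : PySem.Dict String Int :=
    ((PySem.Dict.empty.insert "movie" 0).insert "tv" 0).insert "total" 0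
  let stats := lookup.foldl (fun stats kv =>
    let stats := stats.modify "total" 0 (· + 1)
    if PySem.Str.startswith kv.1 "movie_" then stats.modify "movie" 0 (· + 1)
    else if PySem.Str.startswith kv.1 "tv_" then stats.modify "tv" 0 (· + 1)
    else stats) stats
  stats.items

-- ===== PORT B =====
-- hand port (exact): Python's "head, sep, _ = k.partition('_'); head if sep else None" —
-- the characters before the first '_' if '_' occurs, else none
def labelChars : List Char → Option (List Char)
  | [] => none
  | c :: rest => if c = '_' then some [] else (labelChars rest).map (c :: ·)

def pyLabel (k : String) : Option String := (labelChars k.toList).map String.ofList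

def get_lookup_stats_alt (lookup : List (String × List (String × Int))) : List (String × Int) :=
  let labels := lookup.map (fun kv => pyLabel kv.1)
  [("movie", (labels.count (some "movie") : Int)),
   ("tv", (labels.count (some "tv") : Int)),
   ("total", (labels.length : Int))]

-- ===== PRECONDITION & SPEC =====
def Spec_get_lookup_stats (lookup : List (String × List (String × Int))) (out : List (String × Int)) : Prop := out = get_lookup_stats_alt lookup
instance (lookup : List (String × List (String × Int))) (out : List (String × Int)) : Decidable (Spec_get_lookup_stats lookup out) := by unfold Spec_get_lookup_stats; infer_instance

-- ===== CLAIM (what is proved, stated in full; the proofs are below) =====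
def Claim_equal_get_lookup_stats : Prop := ∀ (lookup : List (String × List (String × Int))), Dom_get_lookup_stats lookup → Spec_get_lookup_stats lookup (get_lookup_stats lookup)

-- ===== LEMMAS AND PROOFS =====

-- Loop invariant for A's pass: starting from a stats dict with exactly the three keys, the
-- final items list adds the prefix counts and the length to the starting values.
theorem foldl_stats_items (lookup : List (String × List (String × Int))) (a b c : Int) :
    (lookup.foldl (fun stats kv =>
      let stats := stats.modify "total" 0 (· + 1)
      if PySem.Str.startswith kv.1 "movie_" then stats.modify "movie" 0 (· + 1)
      else if PySem.Str.startswith kv.1 "tv_" then stats.modify "tv" 0 (· + 1)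
      else stats)
      (PySem.Dict.mk [("movie", a), ("tv", b), ("total", c)])).items
    = [("movie", a + (lookup.countP (fun kv => PySem.Str.startswith kv.1 "movie_") : Int)),
       ("tv", b + (lookup.countP (fun kv => PySem.Str.startswith kv.1 "tv_") : Int)),
       ("total", c + (lookup.length : Int))] := by
  induction lookup generalizing a b c with
  | nil => simp
  | cons kv rest ih =>
    simp only [List.foldl_cons, List.countP_cons, List.length_cons]
    by_cases hm : PySem.Str.startswith kv.1 "movie_" = true
    · have hstep : (((PySem.Dict.mk [("movie", a), ("tv", b), ("total", c)]).modify "total" 0 (· + 1)).modify "movie" 0 (· + 1))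
          = PySem.Dict.mk [("movie", a + 1), ("tv", b), ("total", c + 1)] := by
        simp [PySem.Dict.modify, PySem.Dict.insert, PySem.Dict.contains, PySem.Dict.get?, PySem.Dict.getD]
      have hm' : PySem.Str.startswith kv.1 "tv_" = false := by
        rcases kv with ⟨k, v⟩
        simp only [PySem.Str.startswith_eq] at hm ⊢
        rw [PySem.Chars.startswith_iff] at hm
        rw [Bool.eq_false_iff, Ne, PySem.Chars.startswith_iff]
        intro htv
        rcases List.prefix_or_prefix_of_prefix hm htv with h | h <;> revert h <;> decide
      simp only [hm, hm', if_true, hstep, ih]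
      push_cast
      ring_nf
    · have hstep : ((PySem.Dict.mk [("movie", a), ("tv", b), ("total", c)]).modify "total" 0 (· + 1))
          = PySem.Dict.mk [("movie", a), ("tv", b), ("total", c + 1)] := by
        simp [PySem.Dict.modify, PySem.Dict.insert, PySem.Dict.contains, PySem.Dict.get?, PySem.Dict.getD]
      rw [Bool.not_eq_true] at hm
      by_cases ht : PySem.Str.startswith kv.1 "tv_" = true
      · have hstep2 : (((PySem.Dict.mk [("movie", a), ("tv", b), ("total", c)]).modify "total" 0 (· + 1)).modify "tv" 0 (· + 1))
            = PySem.Dict.mk [("movie", a), ("tv", b + 1), ("total", c + 1)] := by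
          simp [PySem.Dict.modify, PySem.Dict.insert, PySem.Dict.contains, PySem.Dict.get?, PySem.Dict.getD]
        simp only [hm, ht, Bool.false_eq_true, if_false, if_true, hstep2, ih]
        push_cast
        ring_nf
      · rw [Bool.not_eq_true] at ht
        simp only [hm, ht, Bool.false_eq_true, if_false, hstep, ih]
        push_cast
        ring_nf

-- labelChars k = some l (for a label l without '_') iff l followed by '_' is a prefix of k
theorem labelChars_eq_some (l : List Char) (hl : '_' ∉ l) :
    ∀ k : List Char, labelChars k = some l ↔ l ++ ['_'] <+: k := by
  induction l with
  | nil =>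
    intro k
    cases k with
    | nil => simp [labelChars]
    | cons c rest =>
      by_cases hc : c = '_'
      · subst hc; simp [labelChars]
      · simp [labelChars, hc, List.cons_prefix_cons, Ne.symm hc]
  | cons a l' ih =>
    intro k
    have ha : a ≠ '_' := fun h => hl (h ▸ List.mem_cons_self)
    have hl' : '_' ∉ l' := fun h => hl (List.mem_cons_of_mem _ h)
    cases k with
    | nil => simp [labelChars]
    | cons c rest =>
      by_cases hc : c = '_'
      · subst hc
        simp only [List.cons_append, List.cons_prefix_cons]
        constructor
        · intro h; simp [labelChars] at h
        · rintro ⟨h, -⟩; exact absurd h ha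
      · simp only [labelChars, if_neg hc, Option.map_eq_some_iff,
          List.cons_append, List.cons_prefix_cons]
        constructor
        · rintro ⟨l0, h0, h1⟩
          cases h1
          exact ⟨rfl, (ih hl' rest).mp h0⟩
        · rintro ⟨h1, h2⟩
          exact ⟨l', (ih hl' rest).mpr h2, by rw [h1]⟩

-- the classification agrees with A's prefix test, as Bools
theorem pyLabel_eq_startswith (k : String) (l : List Char) (p : String)
    (hl : '_' ∉ l)
    (hp : p.toList = l ++ ['_']) :
    (pyLabel k == some (String.ofList l)) = PySem.Str.startswith k p := by
  rw [Bool.eq_iff_iff, beq_iff_eq, PySem.Str.startswith_eq, PySem.Chars.startswith_iff, hp]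
  unfold pyLabel
  rw [← labelChars_eq_some l hl k.toList]
  constructor
  · intro h
    rcases Option.map_eq_some_iff.mp h with ⟨l0, h0, h1⟩
    have : l0 = l := by
      have h2 := congrArg String.toList h1
      simpa using h2
    rwa [this] at h0
  · intro h
    rw [h, Option.map_some]

-- ===== VERDICT (by name: the statement is the Claim_ definition above) =====
theorem get_lookup_stats_spec : Claim_equal_get_lookup_stats := by
  intro lookup _
  unfold Spec_get_lookup_stats get_lookup_stats get_lookup_stats_alt
  have hinit : ((PySem.Dict.empty.insert "movie" (0 : Int)).insert "tv" 0).insert "total" 0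
      = PySem.Dict.mk [("movie", 0), ("tv", 0), ("total", 0)] := by
    simp [PySem.Dict.empty, PySem.Dict.insert, PySem.Dict.contains]
  have hmv : ∀ kv : String × List (String × Int),
      (pyLabel kv.1 == some "movie") = PySem.Str.startswith kv.1 "movie_" := by
    intro kv
    have := pyLabel_eq_startswith kv.1 ['m','o','v','i','e'] "movie_" (by decide) (by decide)
    simpa using this
  have htv : ∀ kv : String × List (String × Int),
      (pyLabel kv.1 == some "tv") = PySem.Str.startswith kv.1 "tv_" := by
    intro kv
    have := pyLabel_eq_startswith kv.1 ['t','v'] "tv_" (by decide) (by decide)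
    simpa using this
  simp only [hinit, foldl_stats_items, zero_add, List.count_eq_countP, List.countP_map,
    List.length_map]
  congr 2
  · congr 1
    exact (List.countP_congr fun kv _ => by
      simpa using (Bool.eq_iff_iff.mp (hmv kv)).symm)
  · congr 2
    exact (List.countP_congr fun kv _ => by
      simpa using (Bool.eq_iff_iff.mp (htv kv)).symm)
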